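-- pv_equiv track=rewrite | github.com/mehkey/leetcode | python4/2420. Find All Good Indices.py | goodIndices
-- ===== SOURCE A (Python) =====
-- from typing import List
--
-- def goodIndices(nums: List[int], k: int) -> List[int]:
--
--     '''
--     res = []
--     if k >=2:
--         first = [False] * len(nums)
--
--         first[k] = True
--
--         first[len(nums)-k-1] = True
--
--         for i in range(k-1,-1,-1):
--             first[i] = nums[i] >= nums[i+1] and first[i+1]
--
--
--         for i in range(k+1,len(nums)):
--             first[i] = nums[i] >= nums[i-1] and first[i-1]
--     else:
--         first = [True] * len(nums)
--
--
--     for i in range(k, len(nums)-k):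
--
--         if first[i-k] and first[i+k]:
--             res.append(i)
--
--     return res
--     '''
--
--     n, ans= len(nums) ,[]
--     dp1 , dp2= [1]*(n+1), [1]*(n+1)
--     for i in range(1,n):
--         if nums[i-1]>=nums[i]:  dp1[i]= dp1[i-1]+1
--
--     for i in range(n-2,-1,-1):
--         if nums[i]<=nums[i+1]:  dp2[i]= dp2[i+1]+1
--
--     for i in range(k,n-k):
--         if dp1[i-1]>=k and dp2[i+1]>=k: ans+= [i]
--     return ans
-- ===== SOURCE B (Python) =====
-- def goodIndices(nums, k):
--     n = len(nums)
--     # prefix counts over adjacent pairs: pdec[m] = #{j < m : nums[j] >= nums[j+1]},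
--     # pinc[m] = #{j < m : nums[j] <= nums[j+1]}
--     pdec = [0]
--     pinc = [0]
--     for j in range(n - 1):
--         pdec.append(pdec[j] + (1 if nums[j] >= nums[j + 1] else 0))
--         pinc.append(pinc[j] + (1 if nums[j] <= nums[j + 1] else 0))
--     res = []
--     for i in range(k, n - k):
--         if pdec[i - 1] - pdec[i - k] == k - 1 and pinc[i + k] - pinc[i + 1] == k - 1:
--             res.append(i)
--     return res
-- ===== Notes on version B (the rewrite author's own statement) =====
-- stated objective: alternative
-- what changed: Replaces the two DP streak arrays (longest non-increasing run ending at i, longest non-decreasing run starting at i) with prefix-sum tables over the adjacent-pair indicators, deciding each candidate index by two constant-time window-count comparisons instead of streak-length thresholds; Pre_ excludes k <= 0: A raises IndexError for k < 0, and at k = 0 (outside the problem's stated domain 1 <= k) A's all-indices result arises from negative-index wraparound dp1[-1], an accident both behaviours are defensible on.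
-- outside the precondition, e.g. on goodIndices([1, 2], 0): A returns [0, 1], B returns []
import Mathlib
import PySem

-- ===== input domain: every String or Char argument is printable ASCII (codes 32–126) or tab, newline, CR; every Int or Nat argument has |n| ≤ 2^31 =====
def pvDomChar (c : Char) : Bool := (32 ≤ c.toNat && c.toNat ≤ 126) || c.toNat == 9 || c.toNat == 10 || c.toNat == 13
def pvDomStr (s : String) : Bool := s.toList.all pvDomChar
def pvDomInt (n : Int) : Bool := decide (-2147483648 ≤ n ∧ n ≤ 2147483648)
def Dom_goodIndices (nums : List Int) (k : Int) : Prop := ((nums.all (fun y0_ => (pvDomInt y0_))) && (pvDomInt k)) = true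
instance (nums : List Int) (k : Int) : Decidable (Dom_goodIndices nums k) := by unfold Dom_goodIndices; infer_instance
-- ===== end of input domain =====

-- B replaces the two DP streak arrays with prefix-sum tables over the adjacent-pair
-- indicators, deciding each candidate index by two window-count comparisons (alternative
-- algorithm, same asymptotic cost).


-- ===== PORT A =====
-- literal transliteration of A; all pyGetD/pySetD indices are in range whenever Pre_ holds
def goodIndices (nums : List Int) (k : Int) : List Int :=
  let n : Int := nums.length
  let dp1 : List Int := List.replicate (nums.length + 1) 1
  let dp2 : List Int := List.replicate (nums.length + 1) 1
  let dp1 := (PySem.List.pyRange 1 n 1).foldl (fun dp1 i =>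
      if PySem.List.pyGetD nums (i-1) 0 ≥ PySem.List.pyGetD nums i 0 then
        PySem.List.pySetD dp1 i (PySem.List.pyGetD dp1 (i-1) 0 + 1)
      else dp1) dp1
  let dp2 := (PySem.List.pyRange (n-2) (-1) (-1)).foldl (fun dp2 i =>
      if PySem.List.pyGetD nums i 0 ≤ PySem.List.pyGetD nums (i+1) 0 then
        PySem.List.pySetD dp2 i (PySem.List.pyGetD dp2 (i+1) 0 + 1)
      else dp2) dp2
  (PySem.List.pyRange k (n-k) 1).foldl (fun ans i =>
      if PySem.List.pyGetD dp1 (i-1) 0 ≥ k ∧ PySem.List.pyGetD dp2 (i+1) 0 ≥ k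
      then ans ++ [i] else ans) []

-- ===== PORT B =====
-- literal transliteration of Source B: one pass builds the pair (pdec, pinc) of prefix-count
-- lists over adjacent pairs, then each candidate is tested by two window-count equalities
def goodIndices_alt (nums : List Int) (k : Int) : List Int :=
  let n : Int := nums.length
  let pp := (PySem.List.pyRange 0 (n-1) 1).foldl (fun (p : List Int × List Int) j =>
      (p.1 ++ [PySem.List.pyGetD p.1 j 0 +
         (if PySem.List.pyGetD nums j 0 ≥ PySem.List.pyGetD nums (j+1) 0 then 1 else 0)],
       p.2 ++ [PySem.List.pyGetD p.2 j 0 +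
         (if PySem.List.pyGetD nums j 0 ≤ PySem.List.pyGetD nums (j+1) 0 then 1 else 0)]))
      ([0], [0])
  (PySem.List.pyRange k (n - k) 1).foldl (fun res i =>
      if PySem.List.pyGetD pp.1 (i-1) 0 - PySem.List.pyGetD pp.1 (i-k) 0 = k - 1 ∧
         PySem.List.pyGetD pp.2 (i+k) 0 - PySem.List.pyGetD pp.2 (i+1) 0 = k - 1
      then res ++ [i] else res) []

-- ===== PRECONDITION & SPEC =====
-- Pre_ excludes k ≤ 0: A raises IndexError for k < 0, and at k = 0 (outside the problem's
-- stated domain 1 ≤ k) A's all-indices result arises from negative-index wraparound dp1[-1],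
-- an accidental corner on which both behaviours are defensible.
def Pre_goodIndices (nums : List Int) (k : Int) : Prop := 1 ≤ k
instance (nums : List Int) (k : Int) : Decidable (Pre_goodIndices nums k) := by
  unfold Pre_goodIndices; infer_instance
def pvWitness_goodIndices : List Int × Int := ([2, 1, 1, 3, 5], 2)

def Spec_goodIndices (nums : List Int) (k : Int) (out : List Int) : Prop := out = goodIndices_alt nums k
instance (nums : List Int) (k : Int) (out : List Int) : Decidable (Spec_goodIndices nums k out) := by unfold Spec_goodIndices; infer_instance

-- ===== CLAIM (what is proved, stated in full; the proofs are below) =====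
def Claim_equal_goodIndices : Prop := ∀ (nums : List Int) (k : Int), Dom_goodIndices nums k → Pre_goodIndices nums k → Spec_goodIndices nums k (goodIndices nums k)

-- ===== LEMMAS AND PROOFS =====

-- the adjacent-pair indicators both programs are really about
def pd (nums : List Int) (j : Nat) : Bool := decide (nums.getD j 0 ≥ nums.getD (j+1) 0)
def pe (nums : List Int) (j : Nat) : Bool := decide (nums.getD j 0 ≤ nums.getD (j+1) 0)

-- A's streak recurrence, generic in the indicator
def runF (p : Nat → Bool) : Nat → Int
  | 0 => 1
  | m+1 => if p m then runF p m + 1 else 1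

-- B's prefix counts, generic in the indicator
def cntF (p : Nat → Bool) : Nat → Int
  | 0 => 0
  | m+1 => cntF p m + (if p m then 1 else 0)

lemma runF_pos (p : Nat → Bool) (m : Nat) : 1 ≤ runF p m := by
  cases m with
  | zero => simp [runF]
  | succ m => simp only [runF]; split <;> [have := runF_pos p m; skip] <;> omega

lemma cntF_sub_bounds (p : Nat → Bool) (a t : Nat) :
    0 ≤ cntF p (a + t) - cntF p a ∧ cntF p (a + t) - cntF p a ≤ (t:Int) := by
  induction t with
  | zero => simp
  | succ t ih => have : a + (t+1) = (a+t) + 1 := by omega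
                 rw [this]; simp only [cntF]; split <;> push_cast <;> omega

lemma runF_ge_iff (p : Nat → Bool) (m K : Nat) :
    (K:Int) + 1 ≤ runF p m ↔ K ≤ m ∧ ∀ j, m - K ≤ j → j < m → p j = true := by
  induction m generalizing K with
  | zero =>
    simp only [runF]
    constructor
    · intro h; have : K = 0 := by omega
      subst this; exact ⟨le_refl _, by omega⟩
    · rintro ⟨hK, -⟩; have : K = 0 := by omega
      simp [this]
  | succ m ih =>
    simp only [runF]
    by_cases hp : p m = true
    · rw [if_pos hp]
      cases K with
      | zero =>
        have := runF_pos p m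
        constructor
        · intro _; exact ⟨by omega, fun j h1 h2 => by omega⟩
        · intro _; omega
      | succ K =>
        have hcast : ((K+1 : Nat) : Int) + 1 ≤ runF p m + 1 ↔ (K:Int) + 1 ≤ runF p m := by
          push_cast; omega
        rw [hcast, ih]
        constructor
        · rintro ⟨h1, h2⟩
          refine ⟨by omega, fun j hj1 hj2 => ?_⟩
          rcases Nat.lt_or_ge j m with h | h
          · exact h2 j (by omega) h
          · have : j = m := by omega
            subst this; exact hp
        · rintro ⟨h1, h2⟩
          exact ⟨by omega, fun j hj1 hj2 => h2 j (by omega) (by omega)⟩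
    · rw [if_neg hp]
      constructor
      · intro h; have hK : K = 0 := by omega
        subst hK; exact ⟨by omega, fun j h1 h2 => by omega⟩
      · rintro ⟨h1, h2⟩
        rcases Nat.eq_zero_or_pos K with h | h
        · subst h; simp
        · have := h2 m (by omega) (by omega)
          exact absurd this hp

lemma cntF_sub_eq_iff (p : Nat → Bool) (a t : Nat) :
    cntF p (a + t) - cntF p a = (t:Int) ↔ ∀ j, a ≤ j → j < a + t → p j = true := by
  induction t with
  | zero => simp; intro j h1 h2; omega
  | succ t ih =>
    rw [show a + (t+1) = (a+t)+1 from by omega]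
    simp only [cntF]
    have hb := cntF_sub_bounds p a t
    by_cases hp : p (a+t) = true
    · rw [if_pos hp]
      constructor
      · intro h j hj1 hj2
        rcases Nat.lt_or_ge j (a+t) with hj | hj
        · refine ih.mp ?_ j hj1 hj
          push_cast at h; omega
        · have hj' : j = a + t := by omega
          rw [hj']; exact hp
      · intro h
        have := ih.mpr (fun j h1 h2 => h j h1 (by omega))
        push_cast; omega
    · rw [if_neg hp]
      constructor
      · intro h; exfalso; push_cast at h; omega
      · intro h; exact absurd (h (a+t) (by omega) (by omega)) hp

lemma set_map_range (N t : Nat) (f : Nat → Int) (v : Int) :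
    ((List.range N).map f).set t v = (List.range N).map (fun m => if m = t then v else f m) := by
  apply List.ext_getElem
  · simp
  · intro i h1 h2
    simp only [List.getElem_set, List.getElem_map, List.getElem_range]
    by_cases h : i = t
    · simp [h]
    · simp [h, Ne.symm h]

lemma rep_eq (N : Nat) : List.replicate N (1:Int) = (List.range N).map (fun _ => 1) := by
  apply List.ext_getElem <;> simp

lemma dp1_fold (nums : List Int) (T : Nat) (hT : T ≤ nums.length) :
    (PySem.List.pyRange 1 (T:Int) 1).foldl (fun dp1 i =>
      if PySem.List.pyGetD nums (i-1) 0 ≥ PySem.List.pyGetD nums i 0 then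
        PySem.List.pySetD dp1 i (PySem.List.pyGetD dp1 (i-1) 0 + 1)
      else dp1) (List.replicate (nums.length + 1) 1)
    = (List.range (nums.length + 1)).map (fun m => if m < T then runF (pd nums) m else 1) := by
  induction T with
  | zero =>
    rw [PySem.List.pyRange_one_eq_nil (by omega)]
    simp only [List.foldl_nil]
    rw [List.map_congr_left (g := fun _ => (1:Int)) (by intro m _; simp)]
    simp [List.map_const']
  | succ T ih =>
    rcases Nat.eq_zero_or_pos T with hT0 | hT1
    · subst hT0
      rw [show ((1:Nat):Int) = 1 from rfl, PySem.List.pyRange_one_eq_nil (by omega)]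
      simp only [List.foldl_nil]

      rw [List.map_congr_left (g := fun _ => (1:Int))
        (by intro m _
            by_cases h : m < 1
            · have hm : m = 0 := by omega
              subst hm; simp [runF]
            · simp [h])]
      exact rep_eq _
    · have hc1 : ((T+1:Nat):Int) = (T:Int) + 1 := by push_cast; ring
      rw [hc1, PySem.List.pyRange_one_succ_right (by omega), List.foldl_append,
        ih (by omega)]
      simp only [List.foldl_cons, List.foldl_nil]
      have hc2 : (T:Int) - 1 = ((T-1:Nat):Int) := by push_cast [hT1]; ring
      rw [hc2, PySem.List.pyGetD_natCast, PySem.List.pyGetD_natCast,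
        PySem.List.pyGetD_natCast, PySem.List.pySetD_natCast,
        PySem.List.getD_map_range _ _ _ _ (by omega),
        set_map_range]
      rw [if_pos (show T-1 < T by omega)]
      have hrun : runF (pd nums) T = if pd nums (T-1) then runF (pd nums) (T-1) + 1 else 1 := by
        conv_lhs => rw [show T = (T-1)+1 from by omega]
        simp only [runF]
      have hpd : (pd nums (T-1) = true) ↔ (nums.getD (T-1) 0 ≥ nums.getD T 0) := by
        rw [pd, show T-1+1 = T from by omega]; simp
      by_cases hc : nums.getD (T-1) 0 ≥ nums.getD T 0
      · rw [if_pos hc]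
        apply List.map_congr_left
        intro m hm
        by_cases hmT : m = T
        · subst hmT
          rw [if_pos rfl, if_pos (by omega), hrun, if_pos (hpd.mpr hc)]
        · rw [if_neg hmT]
          by_cases h2 : m < T
          · rw [if_pos h2, if_pos (by omega)]
          · rw [if_neg h2, if_neg (by omega)]
      · rw [if_neg hc]
        apply List.map_congr_left
        intro m hm
        by_cases hmT : m = T
        · subst hmT
          rw [if_neg (by omega), if_pos (by omega), hrun,
            if_neg (by rw [hpd]; exact hc)]
        · by_cases h2 : m < T
          · rw [if_pos h2, if_pos (by omega)]
          · rw [if_neg h2, if_neg (by omega)]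

lemma dp2_fold (nums : List Int) (c : Nat) (hc : c ≤ nums.length - 1) :
    (PySem.List.pyRange ((c:Int)-1) (-1) (-1)).foldl (fun dp2 i =>
      if PySem.List.pyGetD nums i 0 ≤ PySem.List.pyGetD nums (i+1) 0 then
        PySem.List.pySetD dp2 i (PySem.List.pyGetD dp2 (i+1) 0 + 1)
      else dp2)
      ((List.range (nums.length + 1)).map (fun m =>
        if c ≤ m ∧ m < nums.length then runF (fun t => pe nums (nums.length - 2 - t)) (nums.length - 1 - m) else 1))
    = (List.range (nums.length + 1)).map (fun m =>
        if m < nums.length then runF (fun t => pe nums (nums.length - 2 - t)) (nums.length - 1 - m) else 1) := by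
  induction c with
  | zero =>
    rw [show ((0:Nat):Int)-1 = -1 from rfl, PySem.List.pyRange_neg_one_eq_nil (by omega)]
    simp only [List.foldl_nil]
    apply List.map_congr_left
    intro m hm
    simp
  | succ c ih =>
    have hlen : c + 1 < nums.length := by omega
    rw [show ((c+1:Nat):Int)-1 = (c:Int) from by push_cast; ring,
      PySem.List.pyRange_neg_one_cons (by omega)]
    simp only [List.foldl_cons]
    have hstep :
        (if PySem.List.pyGetD nums (c:Int) 0 ≤ PySem.List.pyGetD nums ((c:Int)+1) 0 then
          PySem.List.pySetD
            ((List.range (nums.length + 1)).map (fun m =>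
              if c+1 ≤ m ∧ m < nums.length then runF (fun t => pe nums (nums.length - 2 - t)) (nums.length - 1 - m) else 1))
            (c:Int)
            (PySem.List.pyGetD
              ((List.range (nums.length + 1)).map (fun m =>
                if c+1 ≤ m ∧ m < nums.length then runF (fun t => pe nums (nums.length - 2 - t)) (nums.length - 1 - m) else 1))
              ((c:Int)+1) 0 + 1)
        else
          ((List.range (nums.length + 1)).map (fun m =>
            if c+1 ≤ m ∧ m < nums.length then runF (fun t => pe nums (nums.length - 2 - t)) (nums.length - 1 - m) else 1)))
        = (List.range (nums.length + 1)).map (fun m =>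
            if c ≤ m ∧ m < nums.length then runF (fun t => pe nums (nums.length - 2 - t)) (nums.length - 1 - m) else 1) := by
      have hC : (c:Int)+1 = ((c+1:Nat):Int) := by push_cast; ring
      rw [hC, PySem.List.pyGetD_natCast, PySem.List.pyGetD_natCast, PySem.List.pyGetD_natCast,
        PySem.List.pySetD_natCast, PySem.List.getD_map_range _ _ _ _ (by omega), set_map_range]
      rw [if_pos (show c+1 ≤ c+1 ∧ c+1 < nums.length from ⟨le_refl _, hlen⟩)]
      have hR : runF (fun t => pe nums (nums.length - 2 - t)) (nums.length - 1 - c)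
          = if pe nums c then runF (fun t => pe nums (nums.length - 2 - t)) (nums.length - 1 - (c+1)) + 1 else 1 := by
        have h1 : nums.length - 1 - c = (nums.length - 1 - (c+1)) + 1 := by omega
        rw [h1]
        simp only [runF]
        simp only [show nums.length - 2 - (nums.length - 1 - (c+1)) = c from by omega]
      have hpe : (pe nums c = true) ↔ (nums.getD c 0 ≤ nums.getD (c+1) 0) := by
        rw [pe]; simp
      by_cases hcond : nums.getD c 0 ≤ nums.getD (c+1) 0
      · rw [if_pos hcond]
        apply List.map_congr_left
        intro m hm
        by_cases hmc : m = c
        · subst hmc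
          rw [if_pos rfl, if_pos (by omega),
            hR, if_pos (hpe.mpr hcond)]
        · rw [if_neg hmc]
          by_cases h2 : c+1 ≤ m ∧ m < nums.length
          · rw [if_pos h2, if_pos (by omega)]
          · rw [if_neg h2, if_neg (by omega)]
      · rw [if_neg hcond]
        apply List.map_congr_left
        intro m hm
        by_cases hmc : m = c
        · subst hmc
          rw [if_neg (by omega), if_pos (by omega),
            hR, if_neg (by rw [hpe]; exact hcond)]
        · by_cases h2 : c+1 ≤ m ∧ m < nums.length
          · rw [if_pos h2, if_pos (by omega)]
          · rw [if_neg h2, if_neg (by omega)]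
    rw [hstep, ih (by omega)]

lemma pp_fold (nums : List Int) (T : Nat) (hT : T + 1 ≤ nums.length) :
    (PySem.List.pyRange 0 (T:Int) 1).foldl (fun (p : List Int × List Int) j =>
      (p.1 ++ [PySem.List.pyGetD p.1 j 0 +
         (if PySem.List.pyGetD nums j 0 ≥ PySem.List.pyGetD nums (j+1) 0 then 1 else 0)],
       p.2 ++ [PySem.List.pyGetD p.2 j 0 +
         (if PySem.List.pyGetD nums j 0 ≤ PySem.List.pyGetD nums (j+1) 0 then 1 else 0)]))
      ([0], [0])
    = ((List.range (T+1)).map (fun m => cntF (pd nums) m),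
       (List.range (T+1)).map (fun m => cntF (pe nums) m)) := by
  induction T with
  | zero =>
    rw [PySem.List.pyRange_one_eq_nil (by omega)]
    simp [cntF]
  | succ T ih =>
    rw [show ((T+1:Nat):Int) = (T:Int)+1 from by push_cast; ring,
      PySem.List.pyRange_one_succ_right (by omega), List.foldl_append, ih (by omega)]
    simp only [List.foldl_cons, List.foldl_nil]
    have hC : (T:Int)+1 = ((T+1:Nat):Int) := by push_cast; ring
    rw [hC, PySem.List.pyGetD_natCast, PySem.List.pyGetD_natCast, PySem.List.pyGetD_natCast,
      PySem.List.pyGetD_natCast,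
      PySem.List.getD_map_range _ _ _ _ (by omega), PySem.List.getD_map_range _ _ _ _ (by omega)]
    have hd : (if nums.getD T 0 ≥ nums.getD (T+1) 0 then (1:Int) else 0) = (if pd nums T then 1 else 0) := by
      rw [pd]; simp
    have he : (if nums.getD T 0 ≤ nums.getD (T+1) 0 then (1:Int) else 0) = (if pe nums T then 1 else 0) := by
      rw [pe]; simp
    rw [hd, he]
    simp [List.range_succ, cntF]

-- ===== VERDICT (by name: the statement is the Claim_ definition above) =====
theorem goodIndices_spec : Claim_equal_goodIndices := by
  intro nums k _dom hk
  unfold Spec_goodIndices goodIndices goodIndices_alt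
  simp only []
  by_cases hemp : (nums.length:Int) - k ≤ k
  · rw [PySem.List.pyRange_one_eq_nil hemp]
    simp
  · rw [not_le] at hemp
    have hk1 : (1:Int) ≤ k := hk
    have hL3 : 3 ≤ nums.length := by omega
    -- rewrite A's two DP folds into their closed tables
    rw [dp1_fold nums nums.length (le_refl _)]
    have hinit : (List.replicate (nums.length + 1) (1:Int))
        = (List.range (nums.length + 1)).map (fun m =>
            if nums.length - 1 ≤ m ∧ m < nums.length then
              runF (fun t => pe nums (nums.length - 2 - t)) (nums.length - 1 - m) else 1) := by
      rw [rep_eq]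
      apply List.map_congr_left
      intro m hm
      by_cases h : nums.length - 1 ≤ m ∧ m < nums.length
      · have hm' : m = nums.length - 1 := by omega
        rw [if_pos h, hm', show nums.length - 1 - (nums.length - 1) = 0 from by omega]
        simp [runF]
      · rw [if_neg h]
    have hstart : (nums.length:Int) - 2 = ((nums.length - 1 : Nat):Int) - 1 := by
      push_cast [show 1 ≤ nums.length from by omega]; ring
    rw [hstart, hinit, dp2_fold nums (nums.length - 1) (le_refl _)]
    -- rewrite B's prefix fold
    have hT : (nums.length:Int) - 1 = ((nums.length - 1 : Nat):Int) := by
      push_cast [show 1 ≤ nums.length from by omega]; ring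
    rw [hT, pp_fold nums (nums.length - 1) (by omega)]
    simp only []
    -- both final loops are filters over the same range
    rw [PySem.List.foldl_append_ite_eq_filter, PySem.List.foldl_append_ite_eq_filter,
      List.nil_append, List.nil_append]
    apply List.filter_congr
    intro i hi
    rw [decide_eq_decide]
    have hmem := PySem.List.mem_pyRange_one.mp hi
    obtain ⟨hik, hiL⟩ := hmem
    -- name the Nat indices
    have ha : (((i-1).toNat : Nat) : Int) = i - 1 := Int.toNat_of_nonneg (by omega)
    have hb : (((i+1).toNat : Nat) : Int) = i + 1 := Int.toNat_of_nonneg (by omega)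
    have hc : (((i-k).toNat : Nat) : Int) = i - k := Int.toNat_of_nonneg (by omega)
    have hf : (((i+k).toNat : Nat) : Int) = i + k := Int.toNat_of_nonneg (by omega)
    rw [show i - 1 = (((i-1).toNat : Nat) : Int) from ha.symm,
        show i + 1 = (((i+1).toNat : Nat) : Int) from hb.symm,
        show i - k = (((i-k).toNat : Nat) : Int) from hc.symm,
        show i + k = (((i+k).toNat : Nat) : Int) from hf.symm,
        PySem.List.pyGetD_natCast, PySem.List.pyGetD_natCast, PySem.List.pyGetD_natCast,
        PySem.List.pyGetD_natCast, PySem.List.pyGetD_natCast, PySem.List.pyGetD_natCast,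
        PySem.List.getD_map_range _ _ _ _ (by omega),
        PySem.List.getD_map_range _ _ _ _ (by omega),
        PySem.List.getD_map_range _ _ _ _ (by omega),
        PySem.List.getD_map_range _ _ _ _ (by omega),
        PySem.List.getD_map_range _ _ _ _ (by omega),
        PySem.List.getD_map_range _ _ _ _ (by omega)]
    rw [if_pos (show (i-1).toNat < nums.length from by omega),
        if_pos (show (i+1).toNat < nums.length from by omega)]
    have hKi : ((((k-1).toNat : Nat)) : Int) = k - 1 := Int.toNat_of_nonneg (by omega)
    apply and_congr
    · -- decreasing window before i
      have h1 := runF_ge_iff (pd nums) (i-1).toNat (k-1).toNat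
      have h2 := cntF_sub_eq_iff (pd nums) (i-k).toNat (k-1).toNat
      rw [show (i-k).toNat + (k-1).toNat = (i-1).toNat from by omega] at h2
      constructor
      · intro h
        have hw := (h1.mp (by omega)).2
        have := h2.mpr (fun j hj1 hj2 => hw j (by omega) hj2)
        omega
      · intro h
        have hw := h2.mp (by omega)
        have := h1.mpr ⟨by omega, fun j hj1 hj2 => hw j (by omega) hj2⟩
        omega
    · -- increasing window after i
      have h1 := runF_ge_iff (fun t => pe nums (nums.length - 2 - t))
        (nums.length - 1 - (i+1).toNat) (k-1).toNat
      have h2 := cntF_sub_eq_iff (pe nums) (i+1).toNat (k-1).toNat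
      rw [show (i+1).toNat + (k-1).toNat = (i+k).toNat from by omega] at h2
      constructor
      · intro h
        have hw := (h1.mp (by omega)).2
        refine (by omega : cntF (pe nums) (i+k).toNat - cntF (pe nums) (i+1).toNat
            = ((k-1).toNat:Int) → cntF (pe nums) (i+k).toNat - cntF (pe nums) (i+1).toNat = k - 1)
          (h2.mpr (fun j hj1 hj2 => ?_))
        have ht := hw (nums.length - 2 - j) (by omega) (by omega)
        rw [show nums.length - 2 - (nums.length - 2 - j) = j from by omega] at ht
        exact ht
      · intro h
        have hw := h2.mp (by omega)
        have := h1.mpr ⟨by omega, fun t ht1 ht2 => hw (nums.length - 2 - t) (by omega) (by omega)⟩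
        omega
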